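-- pv_equiv track=rewrite | github.com/iandioch/solutions | kattis/digitsum/solution.py | count
-- ===== SOURCE A (Python) =====
-- memo = {}
--
-- def digit_sum(n):
--     ans = 0
--     while n > 0:
--         ans += n%10
--         n //= 10
--     return ans
--
-- def count(n):
--     if n <= 0:
--         return 0
--     if n % 10 == 0:
--         # 1+2+3+4+5+6+7+8+9 = 45
--         ans = 10 * count(n//10) + 45*(n//10)
--         memo[n] = ans
--         return ans
--     ans = count(n-1) + digit_sum(n-1)
--     memo[n] = ans
--     return ans
-- ===== SOURCE B (Python) =====
-- def count(n):
--     total = 0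
--     p = 1
--     while p <= n:
--         full = n // (p * 10)
--         r = n % (p * 10)
--         d = r // p
--         total += full * 45 * p + p * d * (d - 1) // 2 + d * (r % p)
--         p *= 10
--     return total
-- ===== Notes on version B (the rewrite author's own statement) =====
-- stated objective: faster
-- what changed: Replaces A's divide-by-10 recursion (which steps n down by 1 through each non-multiple of 10, with a global memo) by a non-recursive loop over digit positions p = 1, 10, 100, ... that adds a closed-form contribution per position.
import Mathlib
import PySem

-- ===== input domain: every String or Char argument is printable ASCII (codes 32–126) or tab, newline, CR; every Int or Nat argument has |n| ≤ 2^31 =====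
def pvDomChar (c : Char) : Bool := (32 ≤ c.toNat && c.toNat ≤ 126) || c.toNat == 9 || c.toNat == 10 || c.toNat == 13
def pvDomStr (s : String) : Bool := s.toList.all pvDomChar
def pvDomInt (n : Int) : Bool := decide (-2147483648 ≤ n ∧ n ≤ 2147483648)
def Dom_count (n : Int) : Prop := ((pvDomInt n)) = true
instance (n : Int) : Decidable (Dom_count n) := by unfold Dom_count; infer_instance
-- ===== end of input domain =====

-- B replaces A's divide-by-10 recursion (and its write-only global memo, a side effect
-- not modelled here) by a flat loop over digit positions with a closed-form contribution
-- per position; return values agree on every input.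

-- ===== PORT A =====
-- A's digit_sum: while n > 0: ans += n % 10; n //= 10
def dsLoop (n ans : Int) : Int :=
  if 0 < n then dsLoop (PySem.Int.floordiv n 10) (ans + PySem.Int.mod n 10) else ans
  termination_by n.toNat
  decreasing_by
    rename_i h
    rw [PySem.Int.floordiv_eq_ediv_of_pos (by omega)]
    omega

def digit_sum (n : Int) : Int := dsLoop n 0

def count (n : Int) : Int :=
  if _h1 : n ≤ 0 then 0
  else if _h2 : PySem.Int.mod n 10 = 0 then
    10 * count (PySem.Int.floordiv n 10) + 45 * (PySem.Int.floordiv n 10)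
  else
    count (n - 1) + digit_sum (n - 1)
  termination_by n.toNat
  decreasing_by
    · rw [PySem.Int.floordiv_eq_ediv_of_pos (by omega)]
      omega
    · omega

-- ===== PORT B =====
-- B's while loop: p is the current place value, total the accumulator.
-- The '1 ≤ p' conjunct only makes the recursion total (every actual call has p ≥ 1;
-- the Python loop would not terminate for p ≤ 0).
def countAltLoop (n p total : Int) : Int :=
  if h : 1 ≤ p ∧ p ≤ n then
    countAltLoop n (p * 10)
      (total + (PySem.Int.floordiv n (p * 10)) * 45 * p
        + PySem.Int.floordiv (p * (PySem.Int.floordiv (PySem.Int.mod n (p * 10)) p)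
            * ((PySem.Int.floordiv (PySem.Int.mod n (p * 10)) p) - 1)) 2
        + (PySem.Int.floordiv (PySem.Int.mod n (p * 10)) p)
            * (PySem.Int.mod (PySem.Int.mod n (p * 10)) p))
  else total
  termination_by (n + 1 - p).toNat
  decreasing_by omega

def count_alt (n : Int) : Int := countAltLoop n 1 0

-- ===== PRECONDITION & SPEC =====
def Spec_count (n : Int) (out : Int) : Prop := out = count_alt n
instance (n : Int) (out : Int) : Decidable (Spec_count n out) := by unfold Spec_count; infer_instance

-- ===== CLAIM (what is proved, stated in full; the proofs are below) =====
def Claim_equal_count : Prop := ∀ (n : Int), Dom_count n → Spec_count n (count n)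

-- ===== LEMMAS AND PROOFS =====

-- digit_sum facts
theorem dsLoop_acc (n : Int) : ∀ ans, dsLoop n ans = ans + dsLoop n 0 := by
  suffices H : ∀ k (m : Int), m.toNat = k → ∀ ans, dsLoop m ans = ans + dsLoop m 0 by
    exact H n.toNat n rfl
  intro k
  induction k using Nat.strong_induction_on with
  | _ k ih =>
    intro m hm ans
    by_cases h : 0 < m
    · conv_lhs => rw [dsLoop]
      conv_rhs => rw [dsLoop]
      rw [if_pos h, if_pos h]
      rw [PySem.Int.floordiv_eq_ediv_of_pos (by omega : (0:Int) < 10),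
          PySem.Int.mod_eq_emod_of_pos (by omega : (0:Int) < 10)]
      have hlt : (m / 10).toNat < k := by omega
      rw [ih _ hlt (m / 10) rfl (ans + m % 10), ih _ hlt (m / 10) rfl (0 + m % 10)]
      ring
    · conv_lhs => rw [dsLoop]
      conv_rhs => rw [dsLoop]
      rw [if_neg h, if_neg h]
      ring

theorem ds_nonpos {n : Int} (h : n ≤ 0) : digit_sum n = 0 := by
  rw [digit_sum, dsLoop, if_neg (by omega)]

theorem ds_unfold {m : Int} (h : 0 ≤ m) :
    digit_sum m = m % 10 + digit_sum (m / 10) := by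
  by_cases h0 : 0 < m
  · rw [digit_sum, dsLoop, if_pos h0,
        PySem.Int.floordiv_eq_ediv_of_pos (by omega : (0:Int) < 10),
        PySem.Int.mod_eq_emod_of_pos (by omega : (0:Int) < 10),
        dsLoop_acc, digit_sum]
    ring
  · have hm : m = 0 := by omega
    subst hm
    norm_num [ds_nonpos (le_refl (0:Int))]

-- B's per-position term (proof-side abbreviation of the loop body, in ediv/emod form)
def termB (n p : Int) : Int :=
  (n / (p * 10)) * 45 * p
    + (p * ((n % (p * 10)) / p) * (((n % (p * 10)) / p) - 1)) / 2
    + ((n % (p * 10)) / p) * ((n % (p * 10)) % p)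

-- B's loop: unfolding equations and accumulator extraction
theorem countAltLoop_step {n p : Int} (t : Int) (h1 : 1 ≤ p) (h2 : p ≤ n) :
    countAltLoop n p t = countAltLoop n (p * 10) (t + termB n p) := by
  conv_lhs => rw [countAltLoop]
  rw [dif_pos ⟨h1, h2⟩, termB]
  rw [PySem.Int.floordiv_eq_ediv_of_pos (by omega : (0:Int) < p * 10),
      PySem.Int.mod_eq_emod_of_pos (by omega : (0:Int) < p * 10),
      PySem.Int.floordiv_eq_ediv_of_pos (by omega : (0:Int) < p),
      PySem.Int.mod_eq_emod_of_pos (by omega : (0:Int) < p),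
      PySem.Int.floordiv_eq_ediv_of_pos (by omega : (0:Int) < 2)]
  ring_nf

theorem countAltLoop_stop {n p : Int} (t : Int) (h : ¬ (1 ≤ p ∧ p ≤ n)) :
    countAltLoop n p t = t := by
  conv_lhs => rw [countAltLoop]
  rw [dif_neg h]

theorem countAltLoop_acc (n p : Int) : ∀ t, countAltLoop n p t = t + countAltLoop n p 0 := by
  suffices H : ∀ k (q : Int), (n + 1 - q).toNat = k → ∀ t, countAltLoop n q t = t + countAltLoop n q 0 by
    exact H _ p rfl
  intro k
  induction k using Nat.strong_induction_on with
  | _ k ih =>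
    intro q hq t
    by_cases h : 1 ≤ q ∧ q ≤ n
    · rw [countAltLoop_step t h.1 h.2, countAltLoop_step 0 h.1 h.2]
      have hlt : (n + 1 - q * 10).toNat < k := by omega
      rw [ih _ hlt (q * 10) rfl, ih _ hlt (q * 10) rfl (0 + termB n q)]
      ring
    · rw [countAltLoop_stop t h, countAltLoop_stop 0 h]; ring

-- arithmetic identities for the per-position term
theorem modmul_div (n p : Int) (hp : 0 < p) : (n % (p * 10)) / p = (n / p) % 10 := by
  rw [Int.emod_def n (p * 10)]
  have h2 : n - p * 10 * (n / (p * 10)) = n + (-(10 * (n / (p * 10)))) * p := by ring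
  rw [h2, Int.add_mul_ediv_right _ _ (by omega : p ≠ 0),
      ← Int.ediv_ediv_of_nonneg (by omega : (0:Int) ≤ p), Int.emod_def]
  ring

theorem modmul_mod (n p : Int) : (n % (p * 10)) % p = n % p :=
  Int.emod_emod_of_dvd n ⟨10, rfl⟩

theorem termB_eq {n p : Int} (hp : 1 ≤ p) :
    termB n p = ((n / p) / 10) * 45 * p
      + (p * ((n / p) % 10) * (((n / p) % 10) - 1)) / 2
      + ((n / p) % 10) * (n % p) := by
  rw [termB, modmul_div n p (by omega), modmul_mod n p]
  conv_rhs => rw [Int.ediv_ediv_of_nonneg (show (0:Int) ≤ p by omega)]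

-- the step of the closed-form head term
theorem head_step (p c : Int) :
    ((c + 1) / 10) * 45 * p + (p * ((c + 1) % 10) * (((c + 1) % 10) - 1)) / 2
      = (c / 10) * 45 * p + (p * (c % 10) * ((c % 10) - 1)) / 2 + (c % 10) * p := by
  by_cases h9 : c % 10 = 9
  · have h1 : (c + 1) / 10 = c / 10 + 1 := by omega
    have h2 : (c + 1) % 10 = 0 := by omega
    rw [h1, h2, h9]
    have e0 : p * (0:Int) * ((0:Int) - 1) = 0 := by ring
    have e1 : p * (9:Int) * ((9:Int) - 1) = 36 * p * 2 := by ring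
    rw [e0, Int.zero_ediv, e1, Int.mul_ediv_cancel _ (by norm_num : (2:Int) ≠ 0)]
    ring
  · have h1 : (c + 1) / 10 = c / 10 := by omega
    have h2 : (c + 1) % 10 = c % 10 + 1 := by omega
    rw [h1, h2]
    have e1 : p * (c % 10 + 1) * ((c % 10 + 1) - 1)
        = p * (c % 10) * ((c % 10) - 1) + (p * (c % 10)) * 2 := by ring
    rw [e1, Int.add_mul_ediv_right _ _ (by norm_num : (2:Int) ≠ 0)]
    ring

-- term transition: termB (m+1) p = termB m p + digit of m at position p
theorem termB_succ {m p : Int} (hp : 1 ≤ p) :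
    termB (m + 1) p = termB m p + ((m / p) % 10) := by
  rw [termB_eq hp, termB_eq hp]
  have hd : p * (m / p) + m % p = m := by
    have := Int.emod_def m p
    linarith
  have h0 : 0 ≤ m % p := Int.emod_nonneg m (by omega)
  have hlt : m % p < p := Int.emod_lt_of_pos m (by omega)
  have hrep : m + 1 = (m % p + 1) + (m / p) * p := by linarith
  by_cases hcase : m % p + 1 < p
  · have h1 : (m + 1) / p = m / p := by
      rw [hrep, Int.add_mul_ediv_right _ _ (by omega : p ≠ 0),
          Int.ediv_eq_zero_of_lt (by omega) hcase, zero_add]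
    have h2 : (m + 1) % p = m % p + 1 := by
      have hrep' : m + 1 = (m % p + 1) + p * (m / p) := by linarith
      rw [hrep', Int.add_mul_emod_self_left, Int.emod_eq_of_lt (by omega) hcase]
    rw [h1, h2]
    ring
  · have he : m % p = p - 1 := by omega
    have hrep2 : m + 1 = (m / p + 1) * p := by
      rw [he] at hrep; linarith
    have h1 : (m + 1) / p = m / p + 1 := by
      rw [hrep2, Int.mul_ediv_cancel _ (by omega : p ≠ 0)]
    have h2 : (m + 1) % p = 0 := by
      rw [hrep2, Int.mul_emod_left]
    rw [h1, h2, he, head_step p (m / p)]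
    ring

-- the main step lemma for B's loop
theorem loopB_succ {n : Int} (hn : 1 ≤ n) :
    ∀ p, 1 ≤ p → countAltLoop n p 0 = countAltLoop (n - 1) p 0 + digit_sum ((n - 1) / p) := by
  suffices H : ∀ k (p : Int), (n + 1 - p).toNat = k → 1 ≤ p →
      countAltLoop n p 0 = countAltLoop (n - 1) p 0 + digit_sum ((n - 1) / p) by
    exact fun p hp => H _ p rfl hp
  intro k
  induction k using Nat.strong_induction_on with
  | _ k ih =>
    intro p hk hp
    by_cases hpn : p ≤ n
    · by_cases hpn1 : p ≤ n - 1
      · rw [countAltLoop_step 0 hp hpn, countAltLoop_step 0 hp hpn1,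
            countAltLoop_acc n (p * 10), countAltLoop_acc (n - 1) (p * 10)]
        have hih : countAltLoop n (p * 10) 0
            = countAltLoop (n - 1) (p * 10) 0 + digit_sum ((n - 1) / (p * 10)) :=
          ih _ (by omega) (p * 10) rfl (by omega)
        have hterm : termB n p = termB (n - 1) p + ((n - 1) / p) % 10 := by
          have h := termB_succ (m := n - 1) (p := p) hp
          rw [sub_add_cancel] at h
          exact h
        have hds : digit_sum ((n - 1) / p)
            = ((n - 1) / p) % 10 + digit_sum ((n - 1) / p / 10) :=
          ds_unfold (Int.ediv_nonneg (by omega) (by omega))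
        have hdd : (n - 1) / (p * 10) = (n - 1) / p / 10 :=
          (Int.ediv_ediv_of_nonneg (by omega)).symm
        rw [hih, hdd, hterm, hds]
        ring
      · rw [countAltLoop_step 0 hp hpn, countAltLoop_acc,
            countAltLoop_stop (0 : Int) (by omega : ¬ (1 ≤ p * 10 ∧ p * 10 ≤ n)),
            countAltLoop_stop (0 : Int) (by omega : ¬ (1 ≤ p ∧ p ≤ n - 1))]
        have hz : (n - 1) / p = 0 := Int.ediv_eq_zero_of_lt (by omega) (by omega)
        have hpe : p = n := by omega
        rw [hz, ds_nonpos (le_refl 0), hpe, termB_eq (by omega : 1 ≤ n),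
            Int.ediv_self (by omega : n ≠ 0), Int.emod_self]
        norm_num
    · rw [countAltLoop_stop (0 : Int) (by omega), countAltLoop_stop (0 : Int) (by omega)]
      have hz : (n - 1) / p = 0 := Int.ediv_eq_zero_of_lt (by omega) (by omega)
      rw [hz, ds_nonpos (le_refl 0)]
      ring

theorem alt_nonpos {n : Int} (h : n ≤ 0) : count_alt n = 0 := by
  rw [count_alt, countAltLoop_stop (0 : Int) (by omega)]

-- the common specification: SN k = sum of digit sums of 0 .. k-1
def SN : Nat → Int
  | 0 => 0
  | k + 1 => SN k + digit_sum (k : Int)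

theorem SN_step (j : Nat) : SN (j + 1) = SN j + digit_sum (j : Int) := rfl

theorem alt_eq_SN (k : Nat) : count_alt (k : Int) = SN k := by
  induction k with
  | zero =>
    rw [Nat.cast_zero, alt_nonpos (le_refl (0 : Int))]
    rfl
  | succ k ihk =>
    have h := loopB_succ (n := ((k + 1 : Nat) : Int)) (by push_cast; omega) 1 le_rfl
    have e1 : ((k + 1 : Nat) : Int) - 1 = (k : Int) := by push_cast; ring
    rw [count_alt, h, e1, Int.ediv_one, ← count_alt, ihk, SN_step]

theorem SN_scale (k : Nat) : SN (10 * k) = 10 * SN k + 45 * k := by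
  induction k with
  | zero => simp [SN]
  | succ k ihk =>
    have hds : ∀ r : Int, 0 ≤ r → r < 10 →
        digit_sum (10 * (k : Int) + r) = digit_sum (k : Int) + r := by
      intro r hr1 hr2
      rw [ds_unfold (by omega : (0:Int) ≤ 10 * (k : Int) + r),
          show (10 * (k : Int) + r) % 10 = r from by omega,
          show (10 * (k : Int) + r) / 10 = (k : Int) from by omega]
      ring
    have hds' : ∀ r : Nat, r < 10 →
        digit_sum ((10 * k + r : Nat) : Int) = digit_sum (k : Int) + r := by
      intro r hr
      have hc : ((10 * k + r : Nat) : Int) = 10 * (k : Int) + (r : Int) := by push_cast; ring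
      rw [hc]
      exact hds r (by omega) (by exact_mod_cast hr)
    have h0 : digit_sum ((10 * k : Nat) : Int) = digit_sum (k : Int) := by
      have hc : ((10 * k : Nat) : Int) = 10 * (k : Int) + 0 := by push_cast; ring
      rw [hc, hds 0 (by omega) (by omega)]
      ring
    have c1 : SN (10 * k + 1) = SN (10 * k) + digit_sum ((10 * k : Nat) : Int) := SN_step _
    have c2 : SN (10 * k + 2) = SN (10 * k + 1) + digit_sum ((10 * k + 1 : Nat) : Int) := by
      rw [show 10 * k + 2 = (10 * k + 1) + 1 from by omega]; exact SN_step _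
    have c3 : SN (10 * k + 3) = SN (10 * k + 2) + digit_sum ((10 * k + 2 : Nat) : Int) := by
      rw [show 10 * k + 3 = (10 * k + 2) + 1 from by omega]; exact SN_step _
    have c4 : SN (10 * k + 4) = SN (10 * k + 3) + digit_sum ((10 * k + 3 : Nat) : Int) := by
      rw [show 10 * k + 4 = (10 * k + 3) + 1 from by omega]; exact SN_step _
    have c5 : SN (10 * k + 5) = SN (10 * k + 4) + digit_sum ((10 * k + 4 : Nat) : Int) := by
      rw [show 10 * k + 5 = (10 * k + 4) + 1 from by omega]; exact SN_step _
    have c6 : SN (10 * k + 6) = SN (10 * k + 5) + digit_sum ((10 * k + 5 : Nat) : Int) := by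
      rw [show 10 * k + 6 = (10 * k + 5) + 1 from by omega]; exact SN_step _
    have c7 : SN (10 * k + 7) = SN (10 * k + 6) + digit_sum ((10 * k + 6 : Nat) : Int) := by
      rw [show 10 * k + 7 = (10 * k + 6) + 1 from by omega]; exact SN_step _
    have c8 : SN (10 * k + 8) = SN (10 * k + 7) + digit_sum ((10 * k + 7 : Nat) : Int) := by
      rw [show 10 * k + 8 = (10 * k + 7) + 1 from by omega]; exact SN_step _
    have c9 : SN (10 * k + 9) = SN (10 * k + 8) + digit_sum ((10 * k + 8 : Nat) : Int) := by
      rw [show 10 * k + 9 = (10 * k + 8) + 1 from by omega]; exact SN_step _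
    have c10 : SN (10 * k + 10) = SN (10 * k + 9) + digit_sum ((10 * k + 9 : Nat) : Int) := by
      rw [show 10 * k + 10 = (10 * k + 9) + 1 from by omega]; exact SN_step _
    rw [show 10 * (k + 1) = 10 * k + 10 from by ring,
        c10, c9, c8, c7, c6, c5, c4, c3, c2, c1, ihk, h0,
        hds' 1 (by omega), hds' 2 (by omega), hds' 3 (by omega), hds' 4 (by omega),
        hds' 5 (by omega), hds' 6 (by omega), hds' 7 (by omega), hds' 8 (by omega),
        hds' 9 (by omega), SN_step k]
    push_cast
    ring

theorem count_eq_SN (n : Int) : count n = SN n.toNat := by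
  suffices H : ∀ k (m : Int), m.toNat = k → count m = SN m.toNat by
    exact H n.toNat n rfl
  intro k
  induction k using Nat.strong_induction_on with
  | _ k ih =>
    intro m hm
    by_cases h0 : m ≤ 0
    · conv_lhs => rw [count]
      rw [dif_pos h0, show m.toNat = 0 from by omega]
      rfl
    · have hmod : PySem.Int.mod m 10 = m % 10 :=
        PySem.Int.mod_eq_emod_of_pos (by omega)
      have hfd : PySem.Int.floordiv m 10 = m / 10 :=
        PySem.Int.floordiv_eq_ediv_of_pos (by omega)
      conv_lhs => rw [count]
      rw [dif_neg h0, hmod, hfd]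
      by_cases hm0 : m % 10 = 0
      · rw [dif_pos hm0]
        have ihq : count (m / 10) = SN (m / 10).toNat :=
          ih (m / 10).toNat (by omega) _ rfl
        rw [ihq, show m.toNat = 10 * (m / 10).toNat from by omega, SN_scale,
            show (((m / 10).toNat : Nat) : Int) = m / 10 from by omega]
      · rw [dif_neg hm0]
        have ih1 : count (m - 1) = SN (m - 1).toNat :=
          ih (m - 1).toNat (by omega) _ rfl
        have e : SN ((m - 1).toNat + 1) = SN ((m - 1).toNat) + digit_sum (((m - 1).toNat : Int)) :=
          SN_step _
        rw [ih1, show m.toNat = (m - 1).toNat + 1 from by omega, e,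
            show (((m - 1).toNat : Nat) : Int) = m - 1 from by omega]

-- ===== VERDICT (by name: the statement is the Claim_ definition above) =====
theorem count_spec : Claim_equal_count := by
  intro n _
  unfold Spec_count
  by_cases h : n ≤ 0
  · rw [alt_nonpos h, count]
    simp [h]
  · have halt : count_alt n = SN n.toNat := by
      have := alt_eq_SN n.toNat
      rwa [Int.toNat_of_nonneg (by omega)] at this
    rw [count_eq_SN, halt]
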